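-- pv_equiv track=rewrite | github.com/matifur/spaghetti_metric | generated_program.py | euler_polynomial
-- ===== SOURCE A (Python) =====
-- def euler_polynomial(n, x):
--     n, x = int(str(abs(n))[0]), int(str(abs(x))[0])
--     if n > x:
--         x = n
--         x1 = n
--         n = x1
--     E = [1] * (n + 1)
--     for k in range(1, n + 1):
--         E[k] = E[k - 1] * (x - (k - 1))
--     return E[-1]
-- ===== SOURCE B (Python) =====
-- import math
--
-- def euler_polynomial(n, x):
--     n, x = int(str(abs(n))[0]), int(str(abs(x))[0])
--     if n > x:
--         x = n
--     return math.factorial(x) // math.factorial(x - n)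
-- ===== Notes on version B (the rewrite author's own statement) =====
-- stated objective: simpler
-- what changed: After the identical digit-clamping and n>x adjustment, B returns the closed form math.factorial(x)//math.factorial(x-n) instead of building a list of partial products in a loop.
import Mathlib
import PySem

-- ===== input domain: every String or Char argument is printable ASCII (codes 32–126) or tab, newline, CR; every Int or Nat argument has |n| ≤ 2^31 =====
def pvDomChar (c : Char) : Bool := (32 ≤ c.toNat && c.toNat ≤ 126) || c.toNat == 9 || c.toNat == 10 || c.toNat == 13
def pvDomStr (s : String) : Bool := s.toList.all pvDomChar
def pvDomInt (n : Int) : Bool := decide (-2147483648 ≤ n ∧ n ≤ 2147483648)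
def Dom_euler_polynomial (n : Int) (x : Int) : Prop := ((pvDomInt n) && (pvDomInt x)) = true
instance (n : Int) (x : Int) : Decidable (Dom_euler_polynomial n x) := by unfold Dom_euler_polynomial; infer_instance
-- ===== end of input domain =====

-- B replaces A's iterative falling-factorial product with the closed form factorial(x)//factorial(x-n) (objective: simpler).

-- ===== PORT A =====
-- int(str(abs(m))[0]): first decimal digit of |m|.  str(abs(m)) is never empty and its
-- first char is always a digit, so [0] and int() never raise; the getD defaults are unreachable.
def pvClampA (m : Int) : Int :=
  let c : Char := (PySem.List.pyGet? (PySem.Int.toChars |m|) 0).getD '0'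
  (PySem.Int.ofChars? [c]).getD 0

-- the body of A after the clamping line: the `if n > x` block (which leaves n unchanged
-- and sets x to n), the list E of partial products, and E[-1]
def pvCoreA (n : Int) (x : Int) : Int :=
  let x1 : Int := if n > x then n else x
  let E0 : List Int := List.replicate (n + 1).toNat 1
  let E := (PySem.List.pyRange 1 (n + 1) 1).foldl
      (fun E k => PySem.List.pySetD E k (PySem.List.pyGetD E (k - 1) 0 * (x1 - (k - 1)))) E0
  PySem.List.pyGetD E (-1) 0

def euler_polynomial (n : Int) (x : Int) : Int :=
  pvCoreA (pvClampA n) (pvClampA x)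

-- ===== PORT B =====
-- same clamping line as A (the two Python sources share it verbatim)
def pvClampB (m : Int) : Int :=
  let c : Char := (PySem.List.pyGet? (PySem.Int.toChars |m|) 0).getD '0'
  (PySem.Int.ofChars? [c]).getD 0

-- B's body: if n > x: x = n; return math.factorial(x) // math.factorial(x - n)
def pvCoreB (n : Int) (x : Int) : Int :=
  let x' : Int := if n > x then n else x
  PySem.Int.floordiv (Nat.factorial x'.toNat) (Nat.factorial (x' - n).toNat)

def euler_polynomial_alt (n : Int) (x : Int) : Int :=
  pvCoreB (pvClampB n) (pvClampB x)

-- ===== PRECONDITION & SPEC =====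
def Spec_euler_polynomial (n : Int) (x : Int) (out : Int) : Prop := out = euler_polynomial_alt n x
instance (n : Int) (x : Int) (out : Int) : Decidable (Spec_euler_polynomial n x out) := by unfold Spec_euler_polynomial; infer_instance

-- ===== CLAIM (what is proved, stated in full; the proofs are below) =====
def Claim_equal_euler_polynomial : Prop := ∀ (n : Int) (x : Int), Dom_euler_polynomial n x → Spec_euler_polynomial n x (euler_polynomial n x)

-- ===== LEMMAS AND PROOFS =====

-- every char produced by Nat.toDigitsCore 10 on top of acc is acc's or a digitChar of some d ≤ 9
lemma pv_toDigitsCore_mem (fuel n : Nat) (acc : List Char) (c : Char)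
    (hc : c ∈ Nat.toDigitsCore 10 fuel n acc) :
    c ∈ acc ∨ ∃ d : Nat, d ≤ 9 ∧ c = Nat.digitChar d := by
  induction fuel generalizing n acc with
  | zero => exact Or.inl hc
  | succ fuel ih =>
    simp only [Nat.toDigitsCore] at hc
    by_cases h : n / 10 = 0
    · rw [if_pos h] at hc
      rcases List.mem_cons.mp hc with h1 | h1
      · exact Or.inr ⟨n % 10, by omega, h1⟩
      · exact Or.inl h1
    · rw [if_neg h] at hc
      rcases ih _ _ hc with h1 | h1
      · rcases List.mem_cons.mp h1 with h2 | h2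
        · exact Or.inr ⟨n % 10, by omega, h2⟩
        · exact Or.inl h2
      · exact Or.inr h1

lemma pv_toDigitsCore_len (fuel n : Nat) (acc : List Char) :
    acc.length ≤ (Nat.toDigitsCore 10 fuel n acc).length := by
  induction fuel generalizing n acc with
  | zero => simp [Nat.toDigitsCore]
  | succ fuel ih =>
    simp only [Nat.toDigitsCore]
    by_cases h : n / 10 = 0
    · rw [if_pos h]; simp
    · rw [if_neg h]
      calc acc.length ≤ (Nat.digitChar (n % 10) :: acc).length := by simp
        _ ≤ _ := ih _ _

lemma pv_toDigits_ne_nil (n : Nat) : Nat.toDigits 10 n ≠ [] := by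
  simp only [Nat.toDigits, Nat.toDigitsCore]
  by_cases h : n / 10 = 0
  · rw [if_pos h]; simp
  · rw [if_neg h]
    intro hn
    have hl := pv_toDigitsCore_len n (n / 10) [Nat.digitChar (n % 10)]
    rw [hn] at hl
    simp at hl

-- the clamped value is a single decimal digit
lemma pv_clamp_bounds (m : Int) : 0 ≤ pvClampA m ∧ pvClampA m ≤ 9 := by
  unfold pvClampA
  have habs : ¬ (|m| < 0) := not_lt.mpr (abs_nonneg m)
  simp only [PySem.Int.toChars, if_neg habs]
  set cs := Nat.toDigits 10 (|m|).toNat with hcs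
  have hne : cs ≠ [] := pv_toDigits_ne_nil _
  obtain ⟨c, cs', hc⟩ := List.exists_cons_of_ne_nil hne
  have hget : PySem.List.pyGet? cs 0 = some c := by
    rw [hc]; exact PySem.List.pyGet?_zero_cons c cs'
  have hmem : c ∈ cs := by rw [hc]; exact List.mem_cons_self
  rcases pv_toDigitsCore_mem _ _ _ _ hmem with h | ⟨d, hd9, hd⟩
  · simp at h
  · rw [hget, hd]
    simp only [Option.getD_some]
    interval_cases d <;> decide

-- the two bodies agree on single-digit inputs (finite check)
lemma pv_core_eq (a b : Int) (ha0 : 0 ≤ a) (ha9 : a ≤ 9) (hb0 : 0 ≤ b) (hb9 : b ≤ 9) :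
    pvCoreA a b = pvCoreB a b := by
  interval_cases a <;> interval_cases b <;> decide

-- ===== VERDICT (by name: the statement is the Claim_ definition above) =====
theorem euler_polynomial_spec : Claim_equal_euler_polynomial := by
  intro n x _
  unfold Spec_euler_polynomial euler_polynomial euler_polynomial_alt
  have hB : pvClampB = pvClampA := rfl
  rw [hB]
  obtain ⟨hn0, hn9⟩ := pv_clamp_bounds n
  obtain ⟨hx0, hx9⟩ := pv_clamp_bounds x
  exact pv_core_eq _ _ hn0 hn9 hx0 hx9
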